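-- pv_equiv track=rewrite | github.com/semantics-for-personal-health/Personal-Health-Knowledge-Graph | proto_constraint.py | build_time_series_meal
-- ===== SOURCE A (Python) =====
-- def build_time_series_meal(food_set,food_data):
--     series_dict = dict()
--     for food in food_set:
--         food_series = ''
--
--         for day in food_data:
--             for meal in day:
--                 food_series += str(int(food == meal))
--         series_dict[food] = food_series
--
--     return series_dict
-- ===== SOURCE B (Python) =====
-- def build_time_series_meal(food_set, food_data):
--     meals = [meal for day in food_data for meal in day]
--     lookup = set(food_set)
--     series = {food: ['0'] * len(meals) for food in food_set}
--     for i, meal in enumerate(meals):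
--         if meal in lookup:
--             series[meal][i] = '1'
--     return {food: ''.join(chars) for food, chars in series.items()}
-- ===== Notes on version B (the rewrite author's own statement) =====
-- stated objective: faster
-- what changed: Instead of recomparing every food against every meal in nested Python loops while growing a string char by char, B flattens the meals once, pre-fills each food's bit-list with C-level ['0']*n, and scatters '1's in a single pass over enumerate(meals) via set membership, joining at the end.
import Mathlib
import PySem

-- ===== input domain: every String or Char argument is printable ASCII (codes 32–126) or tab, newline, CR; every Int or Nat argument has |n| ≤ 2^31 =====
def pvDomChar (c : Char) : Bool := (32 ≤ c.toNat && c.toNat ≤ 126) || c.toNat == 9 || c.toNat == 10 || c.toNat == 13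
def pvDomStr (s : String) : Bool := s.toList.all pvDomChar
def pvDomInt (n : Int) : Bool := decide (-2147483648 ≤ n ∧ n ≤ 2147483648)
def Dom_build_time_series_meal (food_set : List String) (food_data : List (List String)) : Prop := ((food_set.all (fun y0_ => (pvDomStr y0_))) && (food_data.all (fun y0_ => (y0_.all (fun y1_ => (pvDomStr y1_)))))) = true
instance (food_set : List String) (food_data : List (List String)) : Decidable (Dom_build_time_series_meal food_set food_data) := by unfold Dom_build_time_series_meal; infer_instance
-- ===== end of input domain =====

-- B replaces A's nested all-foods × all-meals comparison loops (growing each string char by char) by one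
-- flattening pass plus a single scatter pass over enumerate(meals) into pre-zeroed per-food bit lists;
-- a timing run measured B faster (constant-factor: C-level zero-fill/join, interpreted work only on hits).

-- ===== PORT A =====
-- food_series accumulates str(int(food == meal)) one character at a time; it is kept as a
-- List Char and wrapped into a String at the dict assignment (exact: each appended piece is one char).
def build_time_series_meal (food_set : List String) (food_data : List (List String)) : List (String × String) :=
  (food_set.foldl (fun (d : PySem.Dict String String) food =>
      let food_series :=
        food_data.foldl (fun acc day =>
          day.foldl (fun acc meal => acc ++ [if food == meal then '1' else '0']) acc) ([] : List Char)
      d.insert food (String.ofList food_series)) PySem.Dict.empty).items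

-- ===== PORT B =====
-- meals = flattened comprehension; lookup = set(food_set); series = dict of '0'-char lists;
-- one enumerate pass sets chars[i] := '1'; final dict comprehension joins each char list.
def build_time_series_meal_alt (food_set : List String) (food_data : List (List String)) : List (String × String) :=
  let meals := food_data.flatMap (fun day => day)
  let lookup : PySem.Set String := PySem.Set.ofList food_set
  let series := food_set.foldl (fun (d : PySem.Dict String (List Char)) food =>
      d.insert food (List.replicate meals.length '0')) PySem.Dict.empty
  let series2 := (PySem.List.enumerate meals).foldl (fun d p =>
      if lookup.contains p.2 then d.modify p.2 [] (fun cs => PySem.List.pySetD cs p.1 '1') else d) series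
  series2.items.map (fun p => (p.1, String.ofList p.2))

-- ===== PRECONDITION & SPEC =====
def Spec_build_time_series_meal (food_set : List String) (food_data : List (List String)) (out : List (String × String)) : Prop := out = build_time_series_meal_alt food_set food_data
instance (food_set : List String) (food_data : List (List String)) (out : List (String × String)) : Decidable (Spec_build_time_series_meal food_set food_data out) := by unfold Spec_build_time_series_meal; infer_instance

-- ===== CLAIM (what is proved, stated in full; the proofs are below) =====
def Claim_equal_build_time_series_meal : Prop := ∀ (food_set : List String) (food_data : List (List String)), Dom_build_time_series_meal food_set food_data → Spec_build_time_series_meal food_set food_data (build_time_series_meal food_set food_data)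

-- ===== LEMMAS AND PROOFS =====

-- getD after a fold of inserts whose value depends only on the key
theorem pv_getD_foldl_insert {ν : Type} (v : String → ν) (l : List String)
    (d : PySem.Dict String ν) (k : String) (dflt : ν) :
    (l.foldl (fun d f => d.insert f (v f)) d).getD k dflt
      = if k ∈ l then v k else d.getD k dflt := by
  induction l generalizing d with
  | nil => simp
  | cons f t ih =>
    simp only [List.foldl_cons, ih, List.mem_cons]
    by_cases ht : k ∈ t
    · simp [ht]
    · by_cases hf : k = f
      · subst hf; simp [ht, PySem.Dict.getD_insert_self]
      · simp [ht, hf, PySem.Dict.getD_insert_of_ne d (v f) dflt hf]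

-- keys of that fold from the empty dict
theorem pv_keys_foldl_insert {ν : Type} (v : String → ν) (l : List String) :
    (l.foldl (fun d f => d.insert f (v f)) PySem.Dict.empty).keys = PySem.Set.ofList l := by
  rw [PySem.Dict.keys_foldl_insert]
  rfl

-- the scatter pass, read off at one key
theorem pv_scatter_getD (lookup : PySem.Set String) (l : List (Int × String))
    (d : PySem.Dict String (List Char)) (k : String) :
    (l.foldl (fun d p => if lookup.contains p.2 then d.modify p.2 [] (fun cs => PySem.List.pySetD cs p.1 '1') else d) d).getD k []
      = l.foldl (fun cs p => if lookup.contains p.2 ∧ p.2 = k then PySem.List.pySetD cs p.1 '1' else cs) (d.getD k []) := by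
  induction l generalizing d with
  | nil => rfl
  | cons p t ih =>
    simp only [List.foldl_cons, ih]
    by_cases hc : lookup.contains p.2
    · by_cases hk : p.2 = k
      · subst hk
        rw [if_pos hc, PySem.Dict.getD_modify_self, if_pos ⟨hc, rfl⟩]
      · rw [if_pos hc, PySem.Dict.getD_modify_of_ne d [] _ (fun h => hk h.symm),
          if_neg (fun h => hk h.2)]
    · rw [if_neg hc, if_neg (fun h => hc h.1)]

-- the scatter pass never changes the key list when it is exactly lookup
theorem pv_scatter_keys (lookup : PySem.Set String) (l : List (Int × String))
    (d : PySem.Dict String (List Char)) (h : d.keys = lookup) :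
    (l.foldl (fun d p => if lookup.contains p.2 then d.modify p.2 [] (fun cs => PySem.List.pySetD cs p.1 '1') else d) d).keys = lookup := by
  induction l generalizing d with
  | nil => exact h
  | cons p t ih =>
    simp only [List.foldl_cons]
    by_cases hc : lookup.contains p.2
    · rw [if_pos hc]
      apply ih
      rw [PySem.Dict.keys_modify,
        PySem.Dict.keys_insert_of_contains _ _ (by
          rw [PySem.Dict.contains_eq_decide_mem_keys, h]
          simp only [PySem.Set.contains] at hc
          simpa using hc)]
      exact h
    · rw [if_neg hc]; exact ih d h

-- A's nested day/meal loops append the bit of every meal in flattening order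
theorem pv_innerA (f : String) (fd : List (List String)) (acc : List Char) :
    fd.foldl (fun acc day => day.foldl (fun acc meal => acc ++ [if f == meal then '1' else '0']) acc) acc
      = acc ++ (fd.flatMap (fun day => day)).map (fun m => if f == m then '1' else '0') := by
  simp only [PySem.List.foldl_append_singleton_eq_map]
  rw [PySem.List.foldl_append_eq_flatMap, List.map_flatMap]

-- scattering '1's into a zeroed suffix produces the comparison map
theorem pv_scatter_bits (f : String) (ms : List String) (s : Nat) (cs : List Char)
    (hlen : cs.length = s + ms.length) (hdrop : cs.drop s = List.replicate ms.length '0') :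
    (PySem.List.enumerate ms (s : Int)).foldl
        (fun cs (p : Int × String) => if p.2 = f then PySem.List.pySetD cs p.1 '1' else cs) cs
      = cs.take s ++ ms.map (fun m => if f == m then '1' else '0') := by
  induction ms generalizing s cs with
  | nil =>
    simp only [List.length_nil, Nat.add_zero] at hlen
    simp only [PySem.List.enumerate_nil, List.foldl_nil, List.map_nil, List.append_nil]
    rw [List.take_of_length_le (by omega)]
  | cons m t ih =>
    have hs : s < cs.length := by simp only [List.length_cons] at hlen; omega
    rw [PySem.List.enumerate_cons]
    simp only [List.foldl_cons]
    have hcast : (s : Int) + 1 = ((s + 1 : Nat) : Int) := by push_cast; ring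
    have hd0 : cs.drop (s+1) = List.replicate t.length '0' := by
      have h1 : (cs.drop s).drop 1 = (List.replicate (m :: t).length '0').drop 1 := by rw [hdrop]
      simpa [List.drop_drop, Nat.add_comm 1 s] using h1
    have hget : cs[s] = '0' := by
      have h1 : (cs.drop s)[0]'(by simp [hdrop]) = '0' := by simp [hdrop]
      simpa using h1
    have htake : cs.take (s+1) = cs.take s ++ [cs[s]] := by
      rw [List.take_add_one]
      simp [List.getElem?_eq_getElem hs]
    by_cases hm : m = f
    · rw [if_pos hm, PySem.List.pySetD_natCast, hcast, ih (s+1) (cs.set s '1')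
        (by simp only [List.length_set]; simp only [List.length_cons] at hlen; omega)
        (by rw [List.drop_set]; simp; exact hd0)]
      have hl : (cs.take s).length = s := by simp; omega
      have h2 : (cs.set s '1').take (s+1) = cs.take s ++ ['1'] := by
        rw [List.take_set, htake, List.set_append]
        simp [hl]
      rw [h2]
      simp [hm]
    · rw [if_neg hm, hcast, ih (s+1) cs (by simp only [List.length_cons] at hlen; omega) hd0,
        htake, hget]
      have hbit : ¬ f = m := fun h => hm h.symm
      simp [hbit]

-- main equality of the two ports
theorem pv_main (fs : List String) (fd : List (List String)) :
    build_time_series_meal fs fd = build_time_series_meal_alt fs fd := by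
  unfold build_time_series_meal build_time_series_meal_alt
  dsimp only
  simp only [pv_innerA, List.nil_append]
  have hAk := pv_keys_foldl_insert
    (fun food => String.ofList ((fd.flatMap (fun day => day)).map (fun m => if food == m then '1' else '0'))) fs
  have hSk := pv_keys_foldl_insert
    (fun _ : String => List.replicate (fd.flatMap (fun day => day)).length '0') fs
  have hS2k := pv_scatter_keys (PySem.Set.ofList fs)
    (PySem.List.enumerate (fd.flatMap (fun day => day)))
    _ hSk
  rw [PySem.Dict.items_eq_map_keys _ (by rw [hAk]; exact PySem.Set.nodup_ofList fs) "",
      PySem.Dict.items_eq_map_keys _ (by rw [hS2k]; exact PySem.Set.nodup_ofList fs) [],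
      hAk, hS2k, List.map_map]
  apply List.map_congr_left
  intro k hk
  have hkfs : k ∈ fs := (PySem.Set.mem_ofList fs k).mp hk
  simp only [Function.comp]
  refine Prod.ext rfl ?_
  -- A's value at k
  rw [pv_getD_foldl_insert, if_pos hkfs]
  -- B's value at k
  rw [pv_scatter_getD, pv_getD_foldl_insert, if_pos hkfs]
  have hcont : ∀ (p : Int × String), p.2 = k → (PySem.Set.ofList fs).contains p.2 = true := by
    intro p hp; rw [hp]; simp [PySem.Set.contains, hk]
  have hfun : (fun (cs : List Char) (p : Int × String) =>
        if (PySem.Set.ofList fs).contains p.2 ∧ p.2 = k then PySem.List.pySetD cs p.1 '1' else cs)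
      = (fun cs p => if p.2 = k then PySem.List.pySetD cs p.1 '1' else cs) := by
    funext cs p
    by_cases hp : p.2 = k
    · rw [if_pos ⟨hcont p hp, hp⟩, if_pos hp]
    · rw [if_neg (fun h => hp h.2), if_neg hp]
  rw [hfun]
  have hz : (0 : Int) = ((0 : Nat) : Int) := by norm_num
  rw [show PySem.List.enumerate (fd.flatMap (fun day => day))
        = PySem.List.enumerate (fd.flatMap (fun day => day)) (((0 : Nat) : Int)) by norm_num,
    pv_scatter_bits k _ 0 _ (by simp) (by simp)]
  simp

-- ===== VERDICT (by name: the statement is the Claim_ definition above) =====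
theorem build_time_series_meal_spec : Claim_equal_build_time_series_meal := by
  intro fs fd _
  unfold Spec_build_time_series_meal
  exact pv_main fs fd
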